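-- pv_equiv track=rewrite | github.com/raj713335/LeetCode | Easy/3581 Count Odd Letters from Number.py | countOddLetters
-- ===== SOURCE A (Python) =====
-- def countOddLetters(n: int) -> int:
--
--     dictx = {0: "zero", 1: "one", 2: "two", 3: "three", 4: "four", 5: "five", 6: "six", 7: "seven", 8: "eight", 9: "nine"}
--
--     res = ""
--
--     for each in str(n):
--         res += dictx[int(each)]
--
--     dictz = {}
--
--     for word in res:
--         if word not in dictz.keys():
--             dictz[word] = 1
--         else:
--             dictz[word] += 1
--
--     count = 0
--
--     for key, value in dictz.items():
--         if value % 2 != 0: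
--             count += 1
--
--     return count
-- ===== SOURCE B (Python) =====
-- def countOddLetters(n: int) -> int:
--     words = {"0": "zero", "1": "one", "2": "two", "3": "three", "4": "four",
--              "5": "five", "6": "six", "7": "seven", "8": "eight", "9": "nine"}
--     odd = set()
--     for d in str(n):
--         for c in words[d]:
--             if c in odd:
--                 odd.discard(c)
--             else:
--                 odd.add(c)
--     return len(odd)
-- ===== Notes on version B (the rewrite author's own statement) =====
-- stated objective: simpler
-- what changed: Replaces A's three passes (build spelled string, build a frequency dict, scan it for odd counts) by one pass that toggles each letter in a parity set while spelling, returning the set's size; the digit words are keyed by the digit character so no int() conversion is needed.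
import Mathlib
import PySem

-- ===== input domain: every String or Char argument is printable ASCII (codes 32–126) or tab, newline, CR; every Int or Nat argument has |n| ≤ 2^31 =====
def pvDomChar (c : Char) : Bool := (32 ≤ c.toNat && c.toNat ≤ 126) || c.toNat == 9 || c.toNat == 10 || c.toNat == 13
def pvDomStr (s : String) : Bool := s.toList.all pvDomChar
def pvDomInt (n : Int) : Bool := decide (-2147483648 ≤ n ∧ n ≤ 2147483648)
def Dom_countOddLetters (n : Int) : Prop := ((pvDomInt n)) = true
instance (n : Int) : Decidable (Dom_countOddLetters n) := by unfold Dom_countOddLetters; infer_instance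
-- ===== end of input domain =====

-- B replaces A's three passes (spell, count frequencies in a dict, scan for odd counts) by a
-- single pass maintaining a parity set of letters seen an odd number of times; return its size.


-- ===== PORT A =====
-- dictx = {0: "zero", ...}
def pvDictx : PySem.Dict Int (List Char) :=
  PySem.Dict.ofList [(0, "zero".toList), (1, "one".toList), (2, "two".toList),
    (3, "three".toList), (4, "four".toList), (5, "five".toList), (6, "six".toList),
    (7, "seven".toList), (8, "eight".toList), (9, "nine".toList)]

def countOddLetters (n : Int) : Int :=
  -- res += dictx[int(each)] for each in str(n); the .getD [] is only reached where
  -- Python would raise (excluded by Pre_)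
  let res : List Char := (PySem.Int.toChars n).foldl
    (fun acc c => acc ++ ((PySem.Int.ofChars? [c]).bind (fun k => pvDictx.get? k)).getD []) []
  -- dictz: if word not in dictz.keys(): dictz[word] = 1 else: dictz[word] += 1
  let dictz : PySem.Dict Char Int := res.foldl
    (fun d w => if d.contains w = false then d.insert w 1 else d.insert w (d.getD w 0 + 1))
    PySem.Dict.empty
  -- count odd values over dictz.items()
  dictz.items.foldl (fun c kv => if PySem.Int.mod kv.2 2 ≠ 0 then c + 1 else c) 0

-- ===== PORT B =====
-- words = {"0": "zero", ...} keyed by the digit character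
def pvWords : PySem.Dict Char (List Char) :=
  PySem.Dict.ofList [('0', "zero".toList), ('1', "one".toList), ('2', "two".toList),
    ('3', "three".toList), ('4', "four".toList), ('5', "five".toList), ('6', "six".toList),
    ('7', "seven".toList), ('8', "eight".toList), ('9', "nine".toList)]

def countOddLetters_alt (n : Int) : Int :=
  let odd : PySem.Set Char := (PySem.Int.toChars n).foldl
    (fun s d => ((pvWords.get? d).getD []).foldl
      (fun s2 c => if PySem.Set.contains s2 c then PySem.Set.discard s2 c else PySem.Set.add s2 c)
      s)
    PySem.Set.empty
  PySem.Set.len odd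

-- ===== PRECONDITION & SPEC =====
-- Pre_ excludes negative n, where A raises ValueError (int('-')) and B raises KeyError ('-').
def Pre_countOddLetters (n : Int) : Prop := 0 ≤ n
instance (n : Int) : Decidable (Pre_countOddLetters n) := by unfold Pre_countOddLetters; infer_instance
def pvWitness_countOddLetters : Int := (121)

def Spec_countOddLetters (n : Int) (out : Int) : Prop := out = countOddLetters_alt n
instance (n : Int) (out : Int) : Decidable (Spec_countOddLetters n out) := by unfold Spec_countOddLetters; infer_instance

-- ===== CLAIM (what is proved, stated in full; the proofs are below) =====
def Claim_equal_countOddLetters : Prop := ∀ (n : Int), Dom_countOddLetters n → Pre_countOddLetters n → Spec_countOddLetters n (countOddLetters n)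

-- ===== LEMMAS AND PROOFS =====

-- the word each version appends for a character
def wordA (c : Char) : List Char := ((PySem.Int.ofChars? [c]).bind (fun k => pvDictx.get? k)).getD []
def wordB (c : Char) : List Char := (pvWords.get? c).getD []

-- every character produced by Nat.toDigitsCore is a digitChar (or came from the accumulator)
theorem mem_toDigitsCore (fuel : Nat) : ∀ (m : Nat) (l : List Char) (c : Char),
    c ∈ Nat.toDigitsCore 10 fuel m l → c ∈ l ∨ ∃ k, k < 10 ∧ c = Nat.digitChar k := by
  induction fuel with
  | zero => intro m l c h; exact Or.inl h
  | succ fuel ih =>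
    intro m l c h
    simp only [Nat.toDigitsCore] at h
    by_cases h0 : m / 10 = 0
    · simp only [h0] at h
      rcases List.mem_cons.mp h with h | h
      · exact Or.inr ⟨m % 10, Nat.mod_lt _ (by omega), h⟩
      · exact Or.inl h
    · simp only [if_neg h0] at h
      rcases ih (m / 10) (Nat.digitChar (m % 10) :: l) c h with h | h
      · rcases List.mem_cons.mp h with h | h
        · exact Or.inr ⟨m % 10, Nat.mod_lt _ (by omega), h⟩
        · exact Or.inl h
      · exact Or.inr h

theorem wordA_eq_wordB {n : Int} (hn : 0 ≤ n) : ∀ c ∈ PySem.Int.toChars n, wordA c = wordB c := by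
  intro c hc
  have : c ∈ Nat.toDigits 10 n.toNat := by
    simpa [PySem.Int.toChars, Int.not_lt.mpr hn] using hc
  rcases mem_toDigitsCore _ _ _ _ this with h | ⟨k, hk, rfl⟩
  · simp at h
  · interval_cases k <;> decide

-- the parity-toggle step of B
def toggle (s : PySem.Set Char) (c : Char) : PySem.Set Char :=
  if PySem.Set.contains s c then PySem.Set.discard s c else PySem.Set.add s c

theorem toggle_foldl_mem (l : List Char) : ∀ (s : PySem.Set Char), s.Nodup →
    (l.foldl toggle s).Nodup ∧
    ∀ x, x ∈ l.foldl toggle s ↔ ((x ∈ s) ↔ l.count x % 2 = 0) := by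
  induction l with
  | nil => intro s hs; exact ⟨hs, fun x => by simp⟩
  | cons c l ih =>
    intro s hs
    have hstep : ∀ x, x ∈ toggle s c ↔ ((x ∈ s) ↔ ¬ x = c) := by
      intro x
      unfold toggle
      by_cases hcs : c ∈ s
      · rw [if_pos ((PySem.Set.contains_iff s c).mpr hcs), PySem.Set.mem_discard]
        by_cases hxc : x = c
        · subst hxc; simp [hcs]
        · simp [hxc]
      · rw [if_neg (by simp [hcs]), PySem.Set.mem_add]
        by_cases hxc : x = c
        · subst hxc; simp [hcs]
        · simp [hxc]
    have hnd : (toggle s c).Nodup := by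
      unfold toggle
      split
      · exact PySem.Set.nodup_discard _ _ hs
      · exact PySem.Set.nodup_add _ _ hs
    obtain ⟨hnd', hmem⟩ := ih (toggle s c) hnd
    refine ⟨by simpa [List.foldl_cons] using hnd', fun x => ?_⟩
    rw [List.foldl_cons, hmem x, hstep x, List.count_cons]
    by_cases hxc : x = c
    · subst hxc
      by_cases hm : x ∈ s <;> simp [hm] <;> omega
    · have hcx : (c == x) = false := by simp [Ne.symm hxc]
      by_cases hm : x ∈ s <;> simp [hm, hxc, hcx]

theorem countOddLetters_res (n : Int) (hn : 0 ≤ n) :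
    (PySem.Int.toChars n).foldl
      (fun acc c => acc ++ ((PySem.Int.ofChars? [c]).bind (fun k => pvDictx.get? k)).getD []) [] =
    (PySem.Int.toChars n).flatMap wordB := by
  rw [show (fun (acc : List Char) c => acc ++ ((PySem.Int.ofChars? [c]).bind (fun k => pvDictx.get? k)).getD [])
        = (fun acc c => acc ++ wordA c) from rfl]
  rw [PySem.List.foldl_append_eq_flatMap]
  simp only [List.nil_append]
  exact List.flatMap_congr (fun c hc => by rw [wordA_eq_wordB hn c hc])

theorem countOddLetters_spec_aux (n : Int) (hn : 0 ≤ n) :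
    countOddLetters n = countOddLetters_alt n := by
  simp only [countOddLetters, countOddLetters_alt]
  rw [countOddLetters_res n hn]
  set res := (PySem.Int.toChars n).flatMap wordB with hres
  -- A's counting dict is Counter(res)
  have hdict : res.foldl
      (fun d w => if d.contains w = false then d.insert w 1 else d.insert w (d.getD w 0 + 1))
      PySem.Dict.empty = PySem.Dict.counter res := by
    rw [← PySem.Dict.foldl_insert_getD_add_one_eq_counter]
    refine PySem.List.foldl_congr_mem _ _ _ _ (fun d w _ => ?_)
    by_cases h : d.contains w = false
    · rw [if_pos h, PySem.Dict.getD_of_not_contains d 0 h]; norm_num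
    · rw [if_neg h]
  rw [hdict]
  -- A's final loop counts odd values over the counter's items
  rw [PySem.Dict.items_counter]
  have hA : (List.map (fun k => (k, (List.count k res : Int))) (PySem.Set.ofList res)).foldl
      (fun c kv => if PySem.Int.mod kv.2 2 ≠ 0 then c + 1 else c) 0
      = ((PySem.Set.ofList res).countP (fun k => decide (res.count k % 2 = 1)) : Int) := by
    rw [List.foldl_map]
    have : ∀ (c : Int) (k : Char),
        (if PySem.Int.mod ((k, (List.count k res : Int)).2) 2 ≠ 0 then c + 1 else c)
        = (if decide (res.count k % 2 = 1) = true then c + 1 else c) := by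
      intro c k
      have : PySem.Int.mod ((List.count k res : Int)) 2 = ((res.count k % 2 : Nat) : Int) :=
        PySem.Int.mod_natCast _ 2
      simp only [this]
      have h2 : res.count k % 2 = 0 ∨ res.count k % 2 = 1 := Nat.mod_two_eq_zero_or_one _
      rcases h2 with h2 | h2 <;> simp [h2]
    rw [PySem.List.foldl_congr_mem _ _ _ _ (fun c k _ => this c k)]
    rw [PySem.List.foldl_count_if]
    simp
  rw [hA]
  -- B's parity set
  obtain ⟨hnd, hmem⟩ := toggle_foldl_mem res PySem.Set.empty List.nodup_nil
  have hBfold : (PySem.Int.toChars n).foldl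
      (fun s d => ((pvWords.get? d).getD []).foldl
        (fun s2 c => if PySem.Set.contains s2 c then PySem.Set.discard s2 c else PySem.Set.add s2 c) s)
      PySem.Set.empty = res.foldl toggle PySem.Set.empty := by
    rw [hres, List.foldl_flatMap]
    rfl
  rw [hBfold]
  -- both sides: length of the set of letters with odd count
  have hmem' : ∀ x, x ∈ List.foldl toggle PySem.Set.empty res ↔ res.count x % 2 = 1 := by
    intro x
    rw [hmem x]
    simp only [PySem.Set.empty, List.not_mem_nil, false_iff]
    omega
  have hfilter : (PySem.Set.ofList res).countP (fun k => decide (res.count k % 2 = 1))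
      = (res.foldl toggle PySem.Set.empty).length := by
    rw [List.countP_eq_length_filter]
    have hperm : ((PySem.Set.ofList res).filter (fun k => decide (res.count k % 2 = 1))).Perm
        (res.foldl toggle PySem.Set.empty) := by
      rw [List.perm_ext_iff_of_nodup (List.Nodup.filter _ (PySem.Set.nodup_ofList res)) hnd]
      intro x
      rw [List.mem_filter, PySem.Set.mem_ofList, hmem' x]
      constructor
      · rintro ⟨_, h⟩
        simpa using h
      · intro h
        exact ⟨List.count_pos_iff.mp (by omega), by simpa using h⟩
    exact hperm.length_eq
  rw [hfilter]
  rfl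

-- ===== VERDICT (by name: the statement is the Claim_ definition above) =====
theorem countOddLetters_spec : Claim_equal_countOddLetters := by
  intro n _ hpre
  unfold Spec_countOddLetters
  exact countOddLetters_spec_aux n hpre
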